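-- pv_equiv track=rewrite | github.com/yezzzp/FortFulkerson | FortFulkerson.py | corte_minimo
-- ===== SOURCE A (Python) =====
-- from collections import deque
--
-- def corte_minimo(R, s):
--     n = len(R)
--     visitado = [False]*n
--     q = deque([s])
--     visitado[s] = True
--     while q:
--         u = q.popleft()
--         for v in range(n):
--             if not visitado[v] and R[u][v] > 0:
--                 visitado[v] = True
--                 q.append(v)
--     S = {i for i, ok in enumerate(visitado) if ok}
--     T = {i for i in range(n) if i not in S}
--     return S, T
-- ===== SOURCE B (Python) =====
-- def corte_minimo(R, s):
--     n = len(R)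
--     visitado = [False] * n
--
--     def dfs(u):
--         visitado[u] = True
--         for v in range(n):
--             if not visitado[v] and R[u][v] > 0:
--                 dfs(v)
--
--     dfs(s)
--     S = {i for i, ok in enumerate(visitado) if ok}
--     T = {i for i in range(n) if i not in S}
--     return S, T
-- ===== Notes on version B (the rewrite author's own statement) =====
-- stated objective: alternative
-- what changed: A's iterative BFS with a deque worklist is replaced by a recursive depth-first search (an inner dfs(u) that marks u and recurses on each unvisited positive-capacity neighbour); the reachable set is traversal-order independent, so the min-cut partition is identical.
-- outside the precondition, e.g. on corte_minimo([[0, 0], [0, 0]], 2): A raises IndexError, B raises IndexError; on corte_minimo([[], [1], [0, 1, 1, 1], []], 2): A returns ({0, 1, 2, 3}, set()), B raises IndexError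
import Mathlib
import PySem

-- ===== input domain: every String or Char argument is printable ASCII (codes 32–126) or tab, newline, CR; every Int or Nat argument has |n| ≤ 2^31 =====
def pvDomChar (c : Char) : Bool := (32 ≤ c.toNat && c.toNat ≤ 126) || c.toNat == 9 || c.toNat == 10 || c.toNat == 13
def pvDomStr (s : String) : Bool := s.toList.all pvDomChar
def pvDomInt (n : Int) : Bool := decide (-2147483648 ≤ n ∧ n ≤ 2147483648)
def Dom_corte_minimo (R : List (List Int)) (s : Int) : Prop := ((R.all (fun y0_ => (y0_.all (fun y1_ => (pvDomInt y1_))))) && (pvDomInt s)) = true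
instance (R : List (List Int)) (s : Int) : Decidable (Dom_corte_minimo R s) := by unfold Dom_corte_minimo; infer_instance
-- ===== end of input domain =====

-- B replaces A's iterative deque BFS with a recursive depth-first search; the reachable
-- set is traversal-order independent, so the min-cut partition is the same.

-- ===== PORT A =====
-- inner 'for v in range(n)' of A's while loop
def bfsStep (R : List (List Int)) (n : Nat) (u : Int) (st : List Bool × List Int) :
    List Bool × List Int :=
  (PySem.List.pyRange 0 (n : Int) 1).foldl (fun st v =>
    if PySem.List.pyGetD st.1 v false = false ∧
        0 < PySem.List.pyGetD (PySem.List.pyGetD R u []) v 0 then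
      (PySem.List.pySetD st.1 v true, st.2 ++ [v])
    else st) st

-- A's 'while q' loop; the fuel n+1 only makes the recursion total — on inputs satisfying
-- Pre_ the queue empties before the fuel does (each vertex is enqueued at most once).
def bfsLoop (R : List (List Int)) (n : Nat) : Nat → List Bool → List Int → List Bool
  | 0, vis, _ => vis
  | fuel + 1, vis, q =>
    match q with
    | [] => vis
    | u :: q' =>
      let st := bfsStep R n u (vis, q')
      bfsLoop R n fuel st.1 st.2

def corte_minimo (R : List (List Int)) (s : Int) : List Int × List Int :=
  let n := R.length
  let visitado := PySem.List.pySetD (List.replicate n false) s true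
  let visF := bfsLoop R n (n + 1) visitado [s]
  let S : PySem.Set Int :=
    PySem.Set.ofList (((PySem.List.enumerate visF 0).filter (fun p => p.2)).map (fun p => p.1))
  let T : PySem.Set Int :=
    PySem.Set.ofList ((PySem.List.pyRange 0 (n : Int) 1).filter (fun i => !(PySem.Set.contains S i)))
  (S, T)

-- ===== PORT B =====
-- B's recursive 'def dfs(u)': mark u, then recurse on every unvisited positive neighbour.
-- The fuel n+1 only makes the nested recursion total — every recursive call is made on a
-- vertex that was unvisited and is marked on entry, so the depth never exceeds n+1.
def dfsVisit (R : List (List Int)) (n : Nat) : Nat → Int → List Bool → List Bool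
  | 0, _, visitado => visitado
  | fuel + 1, u, visitado =>
    (PySem.List.pyRange 0 (n : Int) 1).foldl
      (fun visitado v =>
        if PySem.List.pyGetD visitado v false = false ∧
            0 < PySem.List.pyGetD (PySem.List.pyGetD R u []) v 0 then
          dfsVisit R n fuel v visitado
        else visitado)
      (PySem.List.pySetD visitado u true)

def corte_minimo_alt (R : List (List Int)) (s : Int) : List Int × List Int :=
  let n := R.length
  let visF := dfsVisit R n (n + 1) s (List.replicate n false)
  let S : PySem.Set Int :=
    PySem.Set.ofList (((PySem.List.enumerate visF 0).filter (fun p => p.2)).map (fun p => p.1))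
  let T : PySem.Set Int :=
    PySem.Set.ofList ((PySem.List.pyRange 0 (n : Int) 1).filter (fun i => !(PySem.Set.contains S i)))
  (S, T)

-- ===== PRECONDITION & SPEC =====
-- Pre_ excludes (a) source indices outside Python's accepted range -len(R) ≤ s < len(R),
-- where A raises IndexError, and (b) matrices with a row shorter than len(R), on which
-- whether A raises or returns depends on traversal timing (an artefact; A does return on
-- some of them).
def Pre_corte_minimo (R : List (List Int)) (s : Int) : Prop :=
  (∀ row ∈ R, R.length ≤ row.length) ∧ PySem.Raise.InRange R.length s

instance (R : List (List Int)) (s : Int) : Decidable (Pre_corte_minimo R s) := by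
  unfold Pre_corte_minimo; infer_instance

def pvWitness_corte_minimo : List (List Int) × Int := ([[0, 1], [0, 0]], 0)

def Spec_corte_minimo (R : List (List Int)) (s : Int) (out : List Int × List Int) : Prop :=
  out = corte_minimo_alt R s
instance (R : List (List Int)) (s : Int) (out : List Int × List Int) :
    Decidable (Spec_corte_minimo R s out) := by unfold Spec_corte_minimo; infer_instance

-- ===== CLAIM (what is proved, stated in full; the proofs are below) =====
def Claim_equal_corte_minimo : Prop := ∀ (R : List (List Int)) (s : Int),
  Dom_corte_minimo R s → Pre_corte_minimo R s → Spec_corte_minimo R s (corte_minimo R s)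

-- ===== LEMMAS AND PROOFS =====

-- Proof world: indices as naturals.
def Edge (R : List (List Int)) (u v : Nat) : Prop := 0 < (R.getD u []).getD v 0

def Reach (R : List (List Int)) (t i : Nat) : Prop :=
  Relation.ReflTransGen (fun a b => Edge R a b ∧ b < R.length) t i

-- number of unvisited entries
def cF (vis : List Bool) : Nat := vis.countP (fun b => !b)

-- Nat-world BFS inner step / loop
def nstep (R : List (List Int)) (u : Nat) (st : List Bool × List Nat) (k : Nat) :
    List Bool × List Nat :=
  if st.1.getD k false = false ∧ 0 < (R.getD u []).getD k 0 then
    (st.1.set k true, st.2 ++ [k])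
  else st

def nsteps (R : List (List Int)) (n : Nat) (u : Nat) (st : List Bool × List Nat) :
    List Bool × List Nat :=
  (List.range n).foldl (nstep R u) st

def nloop (R : List (List Int)) (n : Nat) : Nat → List Bool → List Nat → List Bool
  | 0, vis, _ => vis
  | fuel + 1, vis, q =>
    match q with
    | [] => vis
    | u :: q' =>
      let st := nsteps R n u (vis, q')
      nloop R n fuel st.1 st.2

-- Nat-world DFS
def ndfs (R : List (List Int)) : Nat → Nat → List Bool → List Bool
  | 0, _, vis => vis
  | fuel + 1, u, vis =>
    (List.range R.length).foldl
      (fun acc v =>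
        if acc.getD v false = false ∧ 0 < (R.getD u []).getD v 0 then
          ndfs R fuel v acc
        else acc)
      (vis.set u true)

def dstep (R : List (List Int)) (fuel : Nat) (u : Nat) (acc : List Bool) (v : Nat) :
    List Bool :=
  if acc.getD v false = false ∧ 0 < (R.getD u []).getD v 0 then ndfs R fuel v acc else acc

theorem ndfs_succ (R : List (List Int)) (fuel : Nat) (u : Nat) (vis : List Bool) :
    ndfs R (fuel + 1) u vis = (List.range R.length).foldl (dstep R fuel u) (vis.set u true) := rfl

-- --- generic list utilities ---

theorem getD_eq_getElem_bool (l : List Bool) (k : Nat) (hk : k < l.length) :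
    l.getD k false = l[k] := by
  simp [List.getD, List.getElem?_eq_getElem hk]

theorem getD_set_self_bool (l : List Bool) (k : Nat) (hk : k < l.length) (v : Bool) :
    (l.set k v).getD k false = v := by
  simp [List.getD, hk]

theorem getD_set_bool (l : List Bool) (k j : Nat) (v : Bool) (hj : j ≠ k) :
    (l.set k v).getD j false = l.getD j false := by
  simp [List.getD, List.getElem?_set_ne (by omega : k ≠ j)]

theorem getD_false_of_ge (l : List Bool) (k : Nat) (hk : l.length ≤ k) :
    l.getD k false = false := by
  simp [List.getD, List.getElem?_eq_none (by omega : l.length ≤ k)]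

theorem cF_set_true_lt (l : List Bool) (k : Nat) (hk : k < l.length)
    (h : l.getD k false = false) : cF (l.set k true) < cF l := by
  induction l generalizing k with
  | nil => simp at hk
  | cons b bs ih =>
    cases k with
    | zero =>
      simp [List.getD] at h
      subst h
      simp [cF]
    | succ k =>
      have hk' : k < bs.length := by simpa using hk
      have h' : bs.getD k false = false := by simpa [List.getD] using h
      have := ih k hk' h'
      cases b <;> simp [cF] at * <;> omega

theorem cF_le_of_pointwise (vis r : List Bool) (hlen : r.length = vis.length)
    (hm : ∀ i, vis.getD i false = true → r.getD i false = true) : cF r ≤ cF vis := by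
  induction vis generalizing r with
  | nil =>
    have : r = [] := List.eq_nil_of_length_eq_zero hlen
    subst this
    exact le_refl _
  | cons b bs ih =>
    cases r with
    | nil => simp at hlen
    | cons c cs =>
      have hlen' : cs.length = bs.length := by simpa using hlen
      have hm' : ∀ i, bs.getD i false = true → cs.getD i false = true := by
        intro i hi
        have := hm (i + 1) (by simpa [List.getD] using hi)
        simpa [List.getD] using this
      have h0 : b = true → c = true := fun hb => by
        have := hm 0 (by simpa [List.getD] using hb)
        simpa [List.getD] using this
      have := ih cs hlen' hm'
      cases b <;> cases c <;> simp [cF] at * <;> omega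

theorem cF_lt_of_pointwise (vis r : List Bool) (hlen : r.length = vis.length)
    (hm : ∀ i, vis.getD i false = true → r.getD i false = true)
    (u : Nat) (hu : u < vis.length) (h0 : vis.getD u false = false)
    (h1 : r.getD u false = true) : cF r < cF vis := by
  induction vis generalizing r u with
  | nil => simp at hu
  | cons b bs ih =>
    cases r with
    | nil => simp at hlen
    | cons c cs =>
      have hlen' : cs.length = bs.length := by simpa using hlen
      have hm' : ∀ i, bs.getD i false = true → cs.getD i false = true := by
        intro i hi
        have := hm (i + 1) (by simpa [List.getD] using hi)
        simpa [List.getD] using this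
      have hle := cF_le_of_pointwise bs cs hlen' hm'
      cases u with
      | zero =>
        have hb : b = false := by simpa [List.getD] using h0
        have hc : c = true := by simpa [List.getD] using h1
        subst hb; subst hc
        unfold cF at hle ⊢
        simp
        omega
      | succ u =>
        have hu' : u < bs.length := by simpa using hu
        have h0' : bs.getD u false = false := by simpa [List.getD] using h0
        have h1' : cs.getD u false = true := by simpa [List.getD] using h1
        have h0b : b = true → c = true := fun hb => by
          have := hm 0 (by simpa [List.getD] using hb)
          simpa [List.getD] using this
        have := ih cs hlen' hm' u hu' h0' h1'
        cases b <;> cases c <;> simp [cF] at * <;> omega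

-- --- index normalisation ---

def tIdx (len : Nat) (s : Int) : Nat := if 0 ≤ s then s.toNat else len - (-s).toNat

theorem tIdx_lt (len : Nat) (s : Int) (h : PySem.Raise.InRange len s) : tIdx len s < len := by
  simp [PySem.Raise.InRange] at h
  unfold tIdx
  split <;> omega

theorem pySetD_eq_set {α : Type} (xs : List α) (s : Int) (v : α)
    (h : PySem.Raise.InRange xs.length s) :
    PySem.List.pySetD xs s v = xs.set (tIdx xs.length s) v := by
  simp [PySem.Raise.InRange] at h
  by_cases hs : 0 ≤ s
  · rw [PySem.List.pySetD_of_nonneg xs v hs]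
    simp [tIdx, hs]
  · simp [PySem.List.pySetD, PySem.List.pySet?, PySem.List.pyIdx?]
    rw [if_neg hs, if_pos (by omega : -(xs.length : Int) ≤ s)]
    simp [tIdx, hs]

theorem pyGetD_row_eq (R : List (List Int)) (s : Int)
    (h : PySem.Raise.InRange R.length s) :
    PySem.List.pyGetD R s [] = R.getD (tIdx R.length s) [] := by
  simp [PySem.Raise.InRange] at h
  by_cases hs : 0 ≤ s
  · rw [PySem.List.pyGetD_eq_getElem R [] hs (by omega)]
    have : s.toNat < R.length := by omega
    simp [tIdx, hs, List.getD, List.getElem?_eq_getElem this]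
  · have hk : s = -(((-s).toNat : Nat) : Int) := by omega
    have h1 : 0 < (-s).toNat := by omega
    have h2 : (-s).toNat ≤ R.length := by omega
    rw [show tIdx R.length s = R.length - (-s).toNat from by unfold tIdx; rw [if_neg hs]]
    conv_lhs => rw [hk]
    rw [PySem.List.pyGetD_neg_natCast R (-s).toNat [] h1 h2]
    have hlt : R.length - (-s).toNat < R.length := by omega
    simp [List.getD, List.getElem?_eq_getElem hlt]

-- --- bridging: the Int-world ports compute the Nat-world folds ---

def ic (k : Nat) : Int := Int.ofNat k

def pfA (R : List (List Int)) (u : Nat) : (List Bool × List Int) → Nat → (List Bool × List Int) :=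
  fun st k =>
    if PySem.List.pyGetD st.1 (ic k) false = false ∧
        0 < PySem.List.pyGetD (PySem.List.pyGetD R ((u : Nat) : Int) []) (ic k) 0 then
      (PySem.List.pySetD st.1 (ic k) true, st.2 ++ [(ic k)])
    else st

theorem pfA_step (R : List (List Int)) (u : Nat) (vis : List Bool) (q : List Nat) (k : Nat) :
    pfA R u (vis, q.map ic) k
      = ((nstep R u (vis, q) k).1, (nstep R u (vis, q) k).2.map ic) := by
  unfold pfA nstep
  simp only [ic, Int.ofNat_eq_natCast, PySem.List.pyGetD_natCast, PySem.List.pySetD_natCast]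
  by_cases hc : vis.getD k false = false ∧ 0 < (R.getD u []).getD k 0
  · simp only [if_pos hc, List.map_append]
    rfl
  · simp only [if_neg hc]

theorem bfs_fold_map (R : List (List Int)) (u : Nat) (ks : List Nat)
    (vis : List Bool) (q : List Nat) :
    ks.foldl (pfA R u) (vis, q.map ic)
      = ((ks.foldl (nstep R u) (vis, q)).1, (ks.foldl (nstep R u) (vis, q)).2.map ic) := by
  induction ks generalizing vis q with
  | nil => rfl
  | cons k ks ih =>
    rw [List.foldl_cons, List.foldl_cons, pfA_step]
    rw [show nstep R u (vis, q) k = ((nstep R u (vis, q) k).1, (nstep R u (vis, q) k).2) from rfl]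
    exact ih _ _

theorem bfsStep_eq (R : List (List Int)) (n : Nat) (u : Nat) (vis : List Bool) (q : List Nat) :
    bfsStep R n ((u : Nat) : Int) (vis, q.map ic)
      = ((nsteps R n u (vis, q)).1, (nsteps R n u (vis, q)).2.map ic) := by
  unfold bfsStep nsteps
  rw [PySem.List.pyRange_zero_natCast, List.foldl_map]
  exact bfs_fold_map R u (List.range n) vis q

theorem bfsLoop_eq_nloop (R : List (List Int)) (n : Nat) (fuel : Nat)
    (vis : List Bool) (q : List Nat) :
    bfsLoop R n fuel vis (q.map ic) = nloop R n fuel vis q := by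
  induction fuel generalizing vis q with
  | zero => rfl
  | succ fuel ih =>
    cases q with
    | nil => rfl
    | cons u q' =>
      simp only [bfsLoop, nloop, List.map_cons]
      rw [show (ic u) = ((u : Nat) : Int) from rfl, bfsStep_eq R n u vis q']
      exact ih _ _

theorem bfsStep_row_congr (R : List (List Int)) (n : Nat) (u1 u2 : Int)
    (h : PySem.List.pyGetD R u1 [] = PySem.List.pyGetD R u2 []) (st : List Bool × List Int) :
    bfsStep R n u1 st = bfsStep R n u2 st := by
  unfold bfsStep
  rw [h]

theorem loopA_eq (R : List (List Int)) (s : Int) (h : PySem.Raise.InRange R.length s)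
    (fuel : Nat) (vis : List Bool) :
    bfsLoop R R.length (fuel + 1) vis [s]
      = nloop R R.length (fuel + 1) vis [tIdx R.length s] := by
  have hrow : PySem.List.pyGetD R s [] = PySem.List.pyGetD R ((tIdx R.length s : Nat) : Int) [] := by
    rw [pyGetD_row_eq R s h, PySem.List.pyGetD_natCast]
  simp only [bfsLoop, nloop]
  rw [bfsStep_row_congr R R.length s ((tIdx R.length s : Nat) : Int) hrow (vis, [])]
  rw [show ((vis, ([] : List Int)) : List Bool × List Int)
        = (vis, ([] : List Nat).map ic) from rfl]
  rw [bfsStep_eq R R.length (tIdx R.length s) vis []]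
  exact bfsLoop_eq_nloop R R.length fuel _ _

theorem dfsVisit_eq_ndfs (R : List (List Int)) (fuel : Nat) :
    ∀ (u : Nat) (vis : List Bool),
    dfsVisit R R.length fuel ((u : Nat) : Int) vis = ndfs R fuel u vis := by
  induction fuel with
  | zero => intro u vis; rfl
  | succ fuel ih =>
    intro u vis
    simp only [dfsVisit, ndfs]
    rw [PySem.List.pySetD_natCast, PySem.List.pyRange_zero_natCast, List.foldl_map]
    refine PySem.List.foldl_congr_mem _ _ _ _ ?_
    intro acc k _
    simp only [PySem.List.pyGetD_natCast]
    by_cases hc : acc.getD k false = false ∧ 0 < (R.getD u []).getD k 0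
    · rw [if_pos hc, if_pos hc, ih]
    · rw [if_neg hc, if_neg hc]

theorem dfsVisit_top (R : List (List Int)) (s : Int) (h : PySem.Raise.InRange R.length s)
    (fuel : Nat) (vis : List Bool) (hlen : vis.length = R.length) :
    dfsVisit R R.length (fuel + 1) s vis = ndfs R (fuel + 1) (tIdx R.length s) vis := by
  have hrow : PySem.List.pyGetD R s [] = R.getD (tIdx R.length s) [] := pyGetD_row_eq R s h
  have hset : PySem.List.pySetD vis s true = vis.set (tIdx R.length s) true := by
    rw [pySetD_eq_set vis s true (by rw [hlen]; exact h), hlen]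
  simp only [dfsVisit, ndfs]
  rw [hset, hrow, PySem.List.pyRange_zero_natCast, List.foldl_map]
  refine PySem.List.foldl_congr_mem _ _ _ _ ?_
  intro acc k _
  simp only [PySem.List.pyGetD_natCast]
  by_cases hc : acc.getD k false = false ∧ 0 < (R.getD (tIdx R.length s) []).getD k 0
  · rw [if_pos hc, if_pos hc, dfsVisit_eq_ndfs]
  · rw [if_neg hc, if_neg hc]

-- --- small helpers about set/getD ---

theorem getD_set_true_mono (l : List Bool) (k i : Nat) (h : l.getD i false = true) :
    (l.set k true).getD i false = true := by
  by_cases hik : i = k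
  · subst hik
    by_cases hk : i < l.length
    · exact getD_set_self_bool l i hk true
    · rw [List.set_eq_of_length_le (by omega)]
      exact h
  · rw [getD_set_bool l k i true hik]
    exact h

theorem getD_set_true_cases (l : List Bool) (k i : Nat)
    (h : (l.set k true).getD i false = true) : l.getD i false = true ∨ i = k := by
  by_cases hik : i = k
  · exact Or.inr hik
  · rw [getD_set_bool l k i true hik] at h
    exact Or.inl h

-- --- A-side: properties of the inner fold (nstep) ---

theorem nsteps_len (R : List (List Int)) (u : Nat) (ks : List Nat)
    (st : List Bool × List Nat) :
    (ks.foldl (nstep R u) st).1.length = st.1.length := by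
  induction ks generalizing st with
  | nil => rfl
  | cons k ks ih =>
    rw [List.foldl_cons, ih]
    unfold nstep
    split
    · simp
    · rfl

theorem nsteps_mono (R : List (List Int)) (u : Nat) (ks : List Nat)
    (st : List Bool × List Nat) (i : Nat) (h : st.1.getD i false = true) :
    (ks.foldl (nstep R u) st).1.getD i false = true := by
  induction ks generalizing st with
  | nil => exact h
  | cons k ks ih =>
    rw [List.foldl_cons]
    refine ih _ ?_
    unfold nstep
    split
    · exact getD_set_true_mono _ _ _ h
    · exact h

theorem nsteps_queue (R : List (List Int)) (u : Nat) (ks : List Nat)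
    (st : List Bool × List Nat) (hks : ∀ k ∈ ks, k < st.1.length) :
    ∃ ex, (ks.foldl (nstep R u) st).2 = st.2 ++ ex ∧
      ∀ x ∈ ex, x ∈ ks ∧ (ks.foldl (nstep R u) st).1.getD x false = true ∧ Edge R u x := by
  induction ks generalizing st with
  | nil => exact ⟨[], by simp⟩
  | cons k ks ih =>
    have hklen : k < st.1.length := hks k List.mem_cons_self
    have hlen1 : (nstep R u st k).1.length = st.1.length := by
      unfold nstep; split <;> simp
    have hks' : ∀ j ∈ ks, j < (nstep R u st k).1.length := by
      intro j hj; rw [hlen1]; exact hks j (List.mem_cons_of_mem _ hj)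
    rw [List.foldl_cons]
    obtain ⟨ex, he, hx⟩ := ih (nstep R u st k) hks'
    by_cases hc : st.1.getD k false = false ∧ 0 < (R.getD u []).getD k 0
    · have hstep : nstep R u st k = (st.1.set k true, st.2 ++ [k]) := by
        unfold nstep; rw [if_pos hc]
      refine ⟨k :: ex, ?_, ?_⟩
      · rw [he, hstep]; simp
      · intro x hxm
        rcases List.mem_cons.mp hxm with rfl | hxe
        · refine ⟨List.mem_cons_self, ?_, hc.2⟩
          refine nsteps_mono R u ks _ x ?_
          rw [hstep]
          exact getD_set_self_bool st.1 x hklen true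
        · obtain ⟨h1, h2, h3⟩ := hx x hxe
          exact ⟨List.mem_cons_of_mem _ h1, h2, h3⟩
    · have hstep : nstep R u st k = st := by unfold nstep; rw [if_neg hc]
      refine ⟨ex, by rw [he, hstep], ?_⟩
      intro x hxe
      obtain ⟨h1, h2, h3⟩ := hx x hxe
      exact ⟨List.mem_cons_of_mem _ h1, h2, h3⟩

theorem nsteps_new (R : List (List Int)) (u : Nat) (ks : List Nat)
    (st : List Bool × List Nat) (i : Nat)
    (h : (ks.foldl (nstep R u) st).1.getD i false = true) :
    st.1.getD i false = true ∨ (Edge R u i ∧ i ∈ ks) := by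
  induction ks generalizing st with
  | nil => exact Or.inl h
  | cons k ks ih =>
    rw [List.foldl_cons] at h
    rcases ih (nstep R u st k) h with hold | hnew
    · by_cases hc : st.1.getD k false = false ∧ 0 < (R.getD u []).getD k 0
      · have hstep : nstep R u st k = (st.1.set k true, st.2 ++ [k]) := by
          unfold nstep; rw [if_pos hc]
        rw [hstep] at hold
        rcases getD_set_true_cases st.1 k i hold with h1 | rfl
        · exact Or.inl h1
        · exact Or.inr ⟨hc.2, List.mem_cons_self⟩
      · have hstep : nstep R u st k = st := by unfold nstep; rw [if_neg hc]
        rw [hstep] at hold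
        exact Or.inl hold
    · exact Or.inr ⟨hnew.1, List.mem_cons_of_mem _ hnew.2⟩

theorem nsteps_cover (R : List (List Int)) (u : Nat) (ks : List Nat)
    (st : List Bool × List Nat) (v : Nat) (hv : v ∈ ks) (hlen : v < st.1.length)
    (he : Edge R u v) : (ks.foldl (nstep R u) st).1.getD v false = true := by
  induction ks generalizing st with
  | nil => cases hv
  | cons k ks ih =>
    rw [List.foldl_cons]
    have hlen1 : (nstep R u st k).1.length = st.1.length := by
      unfold nstep; split <;> simp
    rcases List.mem_cons.mp hv with rfl | hv'
    · by_cases hc : st.1.getD v false = false ∧ 0 < (R.getD u []).getD v 0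
      · have hstep : nstep R u st v = (st.1.set v true, st.2 ++ [v]) := by
          unfold nstep; rw [if_pos hc]
        refine nsteps_mono R u ks _ v ?_
        rw [hstep]
        exact getD_set_self_bool st.1 v hlen true
      · have hv2 : st.1.getD v false = true := by
          rcases Bool.eq_false_or_eq_true (st.1.getD v false) with h1 | h1
          · exact h1
          · exact absurd ⟨h1, he⟩ hc
        refine nsteps_mono R u ks _ v ?_
        unfold nstep
        split
        · exact getD_set_true_mono _ _ _ hv2
        · exact hv2
    · exact ih (nstep R u st k) hv' (by rw [hlen1]; exact hlen)

theorem nsteps_count (R : List (List Int)) (u : Nat) (ks : List Nat)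
    (st : List Bool × List Nat) (hks : ∀ k ∈ ks, k < st.1.length) :
    (ks.foldl (nstep R u) st).2.length + cF (ks.foldl (nstep R u) st).1
      ≤ st.2.length + cF st.1 := by
  induction ks generalizing st with
  | nil => simp
  | cons k ks ih =>
    have hklen : k < st.1.length := hks k List.mem_cons_self
    have hlen1 : (nstep R u st k).1.length = st.1.length := by
      unfold nstep; split <;> simp
    have hks' : ∀ j ∈ ks, j < (nstep R u st k).1.length := by
      intro j hj; rw [hlen1]; exact hks j (List.mem_cons_of_mem _ hj)
    rw [List.foldl_cons]
    refine le_trans (ih (nstep R u st k) hks') ?_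
    by_cases hc : st.1.getD k false = false ∧ 0 < (R.getD u []).getD k 0
    · have hstep : nstep R u st k = (st.1.set k true, st.2 ++ [k]) := by
        unfold nstep; rw [if_pos hc]
      rw [hstep]
      have := cF_set_true_lt st.1 k hklen hc.1
      simp only [List.length_append, List.length_cons, List.length_nil]
      omega
    · have hstep : nstep R u st k = st := by unfold nstep; rw [if_neg hc]
      rw [hstep]

theorem nsteps_queue_mono (R : List (List Int)) (u : Nat) (ks : List Nat)
    (st : List Bool × List Nat) (x : Nat) (h : x ∈ st.2) :
    x ∈ (ks.foldl (nstep R u) st).2 := by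
  induction ks generalizing st with
  | nil => exact h
  | cons k ks ih =>
    rw [List.foldl_cons]
    refine ih _ ?_
    unfold nstep
    split
    · exact List.mem_append.mpr (Or.inl h)
    · exact h

theorem nsteps_flip_mem (R : List (List Int)) (u : Nat) (ks : List Nat)
    (st : List Bool × List Nat) (w : Nat) (h0 : st.1.getD w false = false)
    (h1 : (ks.foldl (nstep R u) st).1.getD w false = true) :
    w ∈ (ks.foldl (nstep R u) st).2 := by
  induction ks generalizing st with
  | nil => simp only [List.foldl_nil] at h1; rw [h0] at h1; cases h1
  | cons k ks ih =>
    rw [List.foldl_cons] at h1 ⊢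
    by_cases hc : st.1.getD k false = false ∧ 0 < (R.getD u []).getD k 0
    · have hstep : nstep R u st k = (st.1.set k true, st.2 ++ [k]) := by
        unfold nstep; rw [if_pos hc]
      by_cases hwk : w = k
      · subst hwk
        refine nsteps_queue_mono R u ks _ w ?_
        rw [hstep]
        exact List.mem_append.mpr (Or.inr List.mem_cons_self)
      · refine ih _ ?_ h1
        rw [hstep]
        rw [show ((st.1.set k true, st.2 ++ [k]) : List Bool × List Nat).1 = st.1.set k true from rfl]
        rw [getD_set_bool st.1 k w true hwk]
        exact h0
    · have hstep : nstep R u st k = st := by unfold nstep; rw [if_neg hc]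
      rw [hstep] at h1 ⊢
      exact ih st h0 h1

-- --- A-side: the BFS loop invariant ---

theorem nloop_main (R : List (List Int)) (t : Nat) (fuel : Nat) :
    ∀ (vis : List Bool) (q : List Nat),
    vis.length = R.length →
    (∀ x ∈ q, x < R.length ∧ vis.getD x false = true) →
    (∀ i, vis.getD i false = true → Reach R t i) →
    (∀ u, vis.getD u false = true →
      u ∈ q ∨ (∀ v, v < R.length → Edge R u v → vis.getD v false = true)) →
    q.length + cF vis ≤ fuel →
    (∀ i, vis.getD i false = true →
        (nloop R R.length fuel vis q).getD i false = true) ∧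
    (∀ i, (nloop R R.length fuel vis q).getD i false = true → Reach R t i) ∧
    (∀ u v, (nloop R R.length fuel vis q).getD u false = true → v < R.length →
        Edge R u v → (nloop R R.length fuel vis q).getD v false = true) := by
  induction fuel with
  | zero =>
    intro vis q hlen hq hsound hexp hfuel
    have hq0 : q = [] := List.eq_nil_of_length_eq_zero (by omega)
    subst hq0
    refine ⟨fun i h => h, hsound, ?_⟩
    intro u v hu hv he
    rcases hexp u hu with h | h
    · cases h
    · exact h v hv he
  | succ fuel ih =>
    intro vis q hlen hq hsound hexp hfuel
    cases q with
    | nil =>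
      refine ⟨fun i h => h, hsound, ?_⟩
      intro u v hu hv he
      rcases hexp u hu with h | h
      · cases h
      · exact h v hv he
    | cons u q' =>
      have hu : u < R.length ∧ vis.getD u false = true := hq u List.mem_cons_self
      have hks : ∀ k ∈ List.range R.length, k < ((vis, q') : List Bool × List Nat).1.length := by
        intro k hk
        simpa [hlen] using List.mem_range.mp hk
      set st := nsteps R R.length u (vis, q') with hst
      have hstlen : st.1.length = R.length := by
        rw [hst]
        unfold nsteps
        rw [nsteps_len]
        exact hlen
      obtain ⟨ex, hex, hexprop⟩ := nsteps_queue R u (List.range R.length) (vis, q') hks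
      have hmonoSt : ∀ i, vis.getD i false = true → st.1.getD i false = true :=
        fun i h => nsteps_mono R u (List.range R.length) (vis, q') i h
      have hnewSt : ∀ i, st.1.getD i false = true →
          vis.getD i false = true ∨ (Edge R u i ∧ i < R.length) := by
        intro i h
        rcases nsteps_new R u (List.range R.length) (vis, q') i h with h1 | ⟨h1, h2⟩
        · exact Or.inl h1
        · exact Or.inr ⟨h1, List.mem_range.mp h2⟩
      have hq2 : ∀ x ∈ st.2, x < R.length ∧ st.1.getD x false = true := by
        intro x hx
        rw [hst] at hx
        unfold nsteps at hx
        rw [hex] at hx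
        rcases List.mem_append.mp hx with hx1 | hx1
        · obtain ⟨hxl, hxv⟩ := hq x (List.mem_cons_of_mem _ hx1)
          exact ⟨hxl, hmonoSt x hxv⟩
        · obtain ⟨h1, h2, _⟩ := hexprop x hx1
          exact ⟨List.mem_range.mp h1, h2⟩
      have hsound2 : ∀ i, st.1.getD i false = true → Reach R t i := by
        intro i h
        rcases hnewSt i h with h1 | ⟨h1, h2⟩
        · exact hsound i h1
        · exact Relation.ReflTransGen.tail (hsound u hu.2) ⟨h1, h2⟩
      have hexp2 : ∀ w, st.1.getD w false = true →
          w ∈ st.2 ∨ (∀ v, v < R.length → Edge R w v → st.1.getD v false = true) := by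
        intro w hw
        by_cases hwv : vis.getD w false = true
        · rcases hexp w hwv with h3 | h3
          · rcases List.mem_cons.mp h3 with rfl | h4
            · refine Or.inr ?_
              intro v hv he
              exact nsteps_cover R w (List.range R.length) (vis, q') v
                (List.mem_range.mpr hv) (by simpa [hlen] using hv) he
            · refine Or.inl ?_
              rw [hst]
              unfold nsteps
              rw [hex]
              exact List.mem_append.mpr (Or.inl h4)
          · exact Or.inr fun v hv he => hmonoSt v (h3 v hv he)
        · refine Or.inl ?_
          have h0 : vis.getD w false = false := by
            rcases Bool.eq_false_or_eq_true (vis.getD w false) with h | h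
            · exact absurd h hwv
            · exact h
          rw [hst]
          unfold nsteps
          exact nsteps_flip_mem R u (List.range R.length) (vis, q') w h0 hw
      have hcount : st.2.length + cF st.1 ≤ fuel := by
        have hcnt := nsteps_count R u (List.range R.length) (vis, q') hks
        rw [show (List.range R.length).foldl (nstep R u) (vis, q') = st from rfl] at hcnt
        simp only [List.length_cons] at hfuel
        simp only at hcnt
        omega
      have hrec := ih st.1 st.2 hstlen hq2 hsound2 hexp2 hcount
      refine ⟨?_, ?_, ?_⟩
      · intro i h
        simp only [nloop]
        exact hrec.1 i (hmonoSt i h)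
      · intro i h
        simp only [nloop] at h
        exact hrec.2.1 i h
      · intro u' v h hv he
        simp only [nloop] at *
        exact hrec.2.2 u' v h hv he

-- --- A-side characterisation ---

theorem charA (R : List (List Int)) (t : Nat) (ht : t < R.length) (i : Nat) :
    (nloop R R.length (R.length + 1)
        ((List.replicate R.length false).set t true) [t]).getD i false = true
      ↔ Reach R t i := by
  have hlen : ((List.replicate R.length false).set t true).length = R.length := by simp
  have hvis0 : ∀ j, ((List.replicate R.length false).set t true).getD j false = true → j = t := by
    intro j hj
    by_cases hjt : j = t
    · exact hjt
    · rw [getD_set_bool _ t j true hjt] at hj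
      by_cases hjl : j < R.length
      · rw [getD_eq_getElem_bool _ j (by simpa using hjl)] at hj
        simp at hj
      · rw [getD_false_of_ge _ j (by simpa using hjl)] at hj
        cases hj
  have hvt : ((List.replicate R.length false).set t true).getD t false = true :=
    getD_set_self_bool _ t (by simpa using ht) true
  have hmain := nloop_main R t (R.length + 1) ((List.replicate R.length false).set t true) [t]
    hlen
    (by intro x hx; rcases List.mem_cons.mp hx with rfl | h; exact ⟨ht, hvt⟩; cases h)
    (by intro i hi; rw [hvis0 i hi]; exact Relation.ReflTransGen.refl)
    (by intro u hu; rw [hvis0 u hu]; exact Or.inl List.mem_cons_self)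
    (by
      have : cF ((List.replicate R.length false).set t true) ≤ R.length := by
        have := List.countP_le_length (l := (List.replicate R.length false).set t true)
          (p := fun b => !b)
        unfold cF
        omega
      simp only [List.length_cons, List.length_nil]
      omega)
  constructor
  · exact hmain.2.1 i
  · intro hreach
    induction hreach with
    | refl => exact hmain.1 t hvt
    | tail _ hstep ihr => exact hmain.2.2 _ _ ihr hstep.2 hstep.1

-- --- B-side: the DFS invariant ---

-- the state invariant carried across the fold inside one dfs call rooted at u
def DInv (R : List (List Int)) (vis : List Bool) (u : Nat) (acc : List Bool) : Prop :=
  acc.length = R.length ∧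
  (∀ i, vis.getD i false = true → acc.getD i false = true) ∧
  acc.getD u false = true ∧
  (∀ i, acc.getD i false = true → vis.getD i false = true ∨ Reach R u i) ∧
  (∀ w v, acc.getD w false = true → vis.getD w false = false → w ≠ u → v < R.length →
      Edge R w v → acc.getD v false = true) ∧
  cF acc < cF vis

-- what one completed dfs call guarantees
def DOut (R : List (List Int)) (vis : List Bool) (u : Nat) (r : List Bool) : Prop :=
  r.length = vis.length ∧
  (∀ i, vis.getD i false = true → r.getD i false = true) ∧
  r.getD u false = true ∧
  (∀ i, r.getD i false = true → vis.getD i false = true ∨ Reach R u i) ∧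
  (∀ w v, r.getD w false = true → vis.getD w false = false → v < R.length →
      Edge R w v → r.getD v false = true)

theorem dfs_fold (R : List (List Int)) (fuel : Nat) (u : Nat) (vis : List Bool)
    (IH : ∀ (k : Nat) (acc : List Bool), acc.length = R.length → k < R.length →
      acc.getD k false = false → cF acc < fuel → DOut R acc k (ndfs R fuel k acc)) :
    ∀ (ks : List Nat) (acc : List Bool), (∀ k ∈ ks, k < R.length) →
      cF vis < fuel + 1 → DInv R vis u acc →
    DInv R vis u (ks.foldl (dstep R fuel u) acc) ∧
    (∀ i, acc.getD i false = true → (ks.foldl (dstep R fuel u) acc).getD i false = true) ∧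
    (∀ k ∈ ks, Edge R u k → (ks.foldl (dstep R fuel u) acc).getD k false = true) := by
  intro ks
  induction ks with
  | nil =>
    intro acc _ _ hinv
    exact ⟨hinv, fun i h => h, by intro k hk; cases hk⟩
  | cons k ks ih =>
    intro acc hks hfuel hinv
    obtain ⟨hL, hvm, hru, hsnd, hnc, hcf⟩ := hinv
    have hk : k < R.length := hks k List.mem_cons_self
    rw [List.foldl_cons]
    by_cases hc : acc.getD k false = false ∧ 0 < (R.getD u []).getD k 0
    · have hstep : dstep R fuel u acc k = ndfs R fuel k acc := by
        unfold dstep; rw [if_pos hc]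
      have hout := IH k acc hL hk hc.1 (by omega)
      obtain ⟨oL, om, ork, osnd, onc⟩ := hout
      set r' := ndfs R fuel k acc with hr'
      have hL' : r'.length = R.length := by rw [oL, hL]
      have hcf' : cF r' < cF vis := by
        have := cF_lt_of_pointwise acc r' oL om k (by rw [hL]; exact hk) hc.1 ork
        omega
      have hReach_uk : ∀ i, Reach R k i → Reach R u i := by
        intro i hki
        exact Relation.ReflTransGen.head ⟨hc.2, hk⟩ hki
      have hinv' : DInv R vis u r' := by
        refine ⟨hL', fun i hi => om i (hvm i hi), om u hru, ?_, ?_, hcf'⟩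
        · intro i hi
          rcases osnd i hi with h1 | h1
          · exact hsnd i h1
          · exact Or.inr (hReach_uk i h1)
        · intro w v hw hvw hwu hv he
          by_cases haw : acc.getD w false = true
          · exact om v (hnc w v haw hvw hwu hv he)
          · have haw' : acc.getD w false = false := by
              rcases Bool.eq_false_or_eq_true (acc.getD w false) with h | h
              · exact absurd h haw
              · exact h
            exact onc w v hw haw' hv he
      have hrec := ih r' (fun j hj => hks j (List.mem_cons_of_mem _ hj)) hfuel hinv'
      rw [hstep]
      refine ⟨hrec.1, ?_, ?_⟩
      · intro i hi
        exact hrec.2.1 i (om i hi)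
      · intro j hj hej
        rcases List.mem_cons.mp hj with rfl | hj'
        · exact hrec.2.1 j ork
        · exact hrec.2.2 j hj' hej
    · have hstep : dstep R fuel u acc k = acc := by
        unfold dstep; rw [if_neg hc]
      rw [hstep]
      have hrec := ih acc (fun j hj => hks j (List.mem_cons_of_mem _ hj)) hfuel
        ⟨hL, hvm, hru, hsnd, hnc, hcf⟩
      refine ⟨hrec.1, hrec.2.1, ?_⟩
      intro j hj hej
      rcases List.mem_cons.mp hj with rfl | hj'
      · have hjt : acc.getD j false = true := by
          rcases Bool.eq_false_or_eq_true (acc.getD j false) with h | h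
          · exact h
          · exact absurd ⟨h, hej⟩ hc
        exact hrec.2.1 j hjt
      · exact hrec.2.2 j hj' hej

theorem dfs_main (R : List (List Int)) (fuel : Nat) :
    ∀ (u : Nat) (vis : List Bool), vis.length = R.length → u < R.length →
      vis.getD u false = false → cF vis < fuel → DOut R vis u (ndfs R fuel u vis) := by
  induction fuel with
  | zero => intro u vis _ _ _ hfuel; omega
  | succ fuel ih =>
    intro u vis hlen hu h0 hfuel
    have hulen : u < vis.length := by rw [hlen]; exact hu
    have hinv0 : DInv R vis u (vis.set u true) := by
      refine ⟨by simpa using hlen, fun i hi => getD_set_true_mono _ _ _ hi,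
        getD_set_self_bool vis u hulen true, ?_, ?_, cF_set_true_lt vis u hulen h0⟩
      · intro i hi
        rcases getD_set_true_cases vis u i hi with h1 | rfl
        · exact Or.inl h1
        · exact Or.inr Relation.ReflTransGen.refl
      · intro w v hw hvw hwu _ _
        rcases getD_set_true_cases vis u w hw with h1 | rfl
        · rw [h1] at hvw; cases hvw
        · exact absurd rfl hwu
    have hfold := dfs_fold R fuel u vis
      (fun k acc hL hk hk0 hf => ih k acc hL hk hk0 hf)
      (List.range R.length) (vis.set u true) (fun k hk => List.mem_range.mp hk)
      hfuel hinv0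
    obtain ⟨⟨fL, fvm, fru, fsnd, fnc, _⟩, fmono, fnb⟩ := hfold
    rw [ndfs_succ]
    refine ⟨by rw [fL, hlen], fvm, fru, fsnd, ?_⟩
    intro w v hw hvw hv he
    by_cases hwu : w = u
    · subst hwu
      exact fnb v (List.mem_range.mpr hv) he
    · exact fnc w v hw hvw hwu hv he

-- --- B-side characterisation ---

theorem charB (R : List (List Int)) (t : Nat) (ht : t < R.length) (i : Nat) :
    (ndfs R (R.length + 1) t (List.replicate R.length false)).getD i false = true
      ↔ Reach R t i := by
  have hlen : (List.replicate R.length false).length = R.length := by simp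
  have hall : ∀ j, (List.replicate R.length false).getD j false = false := by
    intro j
    by_cases hj : j < R.length
    · rw [getD_eq_getElem_bool _ j (by simpa using hj)]
      simp
    · exact getD_false_of_ge _ j (by simpa using hj)
  have hcf : cF (List.replicate R.length false) < R.length + 1 := by
    have := List.countP_le_length (l := List.replicate R.length false) (p := fun b => !b)
    unfold cF
    simp at this ⊢
    omega
  have hmain := dfs_main R (R.length + 1) t (List.replicate R.length false) hlen ht
    (hall t) hcf
  obtain ⟨_, _, hrt, hsnd, hnc⟩ := hmain
  constructor
  · intro hi
    rcases hsnd i hi with h1 | h1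
    · rw [hall i] at h1; cases h1
    · exact h1
  · intro hreach
    induction hreach with
    | refl => exact hrt
    | tail _ hstep ihr => exact hnc _ _ ihr (hall _) hstep.2 hstep.1

-- --- assembly ---

theorem nloop_len (R : List (List Int)) (n : Nat) (fuel : Nat) :
    ∀ (vis : List Bool) (q : List Nat), (nloop R n fuel vis q).length = vis.length := by
  induction fuel with
  | zero => intro vis q; rfl
  | succ fuel ih =>
    intro vis q
    cases q with
    | nil => rfl
    | cons u q' =>
      simp only [nloop]
      rw [ih]
      unfold nsteps
      exact nsteps_len R u (List.range n) (vis, q')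

theorem list_eq_of_getD (l1 l2 : List Bool) (hlen : l1.length = l2.length)
    (h : ∀ i, l1.getD i false = l2.getD i false) : l1 = l2 := by
  refine List.ext_getElem hlen ?_
  intro i h1 h2
  have := h i
  rwa [getD_eq_getElem_bool _ _ h1, getD_eq_getElem_bool _ _ h2] at this

theorem visF_eq (R : List (List Int)) (s : Int) (hin : PySem.Raise.InRange R.length s) :
    bfsLoop R R.length (R.length + 1)
        (PySem.List.pySetD (List.replicate R.length false) s true) [s]
      = dfsVisit R R.length (R.length + 1) s (List.replicate R.length false) := by
  have hin' : PySem.Raise.InRange (List.replicate R.length false).length s := by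
    simpa using hin
  have hvis0 : PySem.List.pySetD (List.replicate R.length false) s true
      = (List.replicate R.length false).set (tIdx R.length s) true := by
    rw [pySetD_eq_set _ s true hin']
    simp
  have ht : tIdx R.length s < R.length := tIdx_lt R.length s hin
  rw [hvis0, loopA_eq R s hin R.length _,
    dfsVisit_top R s hin R.length (List.replicate R.length false) (by simp)]
  have hvset : ndfs R (R.length + 1) (tIdx R.length s) (List.replicate R.length false)
      = (List.range R.length).foldl (dstep R R.length (tIdx R.length s))
          ((List.replicate R.length false).set (tIdx R.length s) true) := ndfs_succ ..
  -- compare the two final visited vectors pointwise through reachability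
  have hBlen : (ndfs R (R.length + 1) (tIdx R.length s) (List.replicate R.length false)).length
      = R.length := by
    have := (dfs_main R (R.length + 1) (tIdx R.length s) (List.replicate R.length false)
      (by simp) ht
      (by
        by_cases hj : tIdx R.length s < R.length
        · rw [getD_eq_getElem_bool _ _ (by simpa using hj)]; simp
        · exact absurd ht hj)
      (by
        have := List.countP_le_length (l := List.replicate R.length false) (p := fun b => !b)
        unfold cF
        simp at this ⊢
        omega)).1
    simpa using this
  refine list_eq_of_getD _ _ ?_ ?_
  · rw [nloop_len, hBlen]
    simp
  · intro i
    rcases Bool.eq_false_or_eq_true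
        ((nloop R R.length (R.length + 1)
          ((List.replicate R.length false).set (tIdx R.length s) true)
          [tIdx R.length s]).getD i false) with hb | hb
    · rw [hb]
      have hr : Reach R (tIdx R.length s) i := (charA R (tIdx R.length s) ht i).mp hb
      exact ((charB R (tIdx R.length s) ht i).mpr hr).symm
    · rw [hb]
      rcases Bool.eq_false_or_eq_true
          ((ndfs R (R.length + 1) (tIdx R.length s)
            (List.replicate R.length false)).getD i false) with hb2 | hb2
      · have hr : Reach R (tIdx R.length s) i := (charB R (tIdx R.length s) ht i).mp hb2
        rw [(charA R (tIdx R.length s) ht i).mpr hr] at hb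
        cases hb
      · rw [hb2]

-- ===== VERDICT (by name: the statement is the Claim_ definition above) =====
theorem corte_minimo_spec : Claim_equal_corte_minimo := by
  intro R s _ hPre
  unfold Spec_corte_minimo corte_minimo corte_minimo_alt
  simp only
  rw [visF_eq R s hPre.2]
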